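-- pv_equiv track=rewrite | github.com/vishnupriyanpr/Terminal-Pal- | ai_terminal_pal.py | extract_filename_from_traceback
-- ===== SOURCE A (Python) =====
-- from typing import Optional, Dict, List, Any, Union
--
-- def extract_filename_from_traceback(traceback: str) -> Optional[str]:
--     """Extract filename from Python traceback"""
--     lines = traceback.split('\n')
--     for line in lines:
--         if 'File "' in line:
--             # Extract filename between quotes
--             start = line.find('File "') + 6
--             end = line.find('"', start)
--             if start > 5 and end > start:
--                 filename = line[start:end]
--                 # Return only if it's a real file (not <stdin>, <string>, etc.)
--                 if not filename.startswith('<') and not filename.endswith('>'):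
--                     return filename
--     return None
-- ===== SOURCE B (Python) =====
-- def extract_filename_from_traceback(traceback):
--     """Extract filename from Python traceback"""
--     # Single cursor over the raw string: no line splitting, no find() calls.
--     # At a 'File "' match, collect the name char by char up to the closing
--     # quote; on a rejected or unclosed name, jump the cursor to the next
--     # newline (first match per line, exactly like the per-line reading).
--     n = len(traceback)
--     i = 0
--     while i < n:
--         if traceback.startswith('File "', i):
--             j = i + 6
--             chars = []
--             while j < n and traceback[j] != '"' and traceback[j] != '\n':
--                 chars.append(traceback[j])
--                 j += 1
--             if j < n and traceback[j] == '"':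
--                 name = ''.join(chars)
--                 if name and not name.startswith('<') and not name.endswith('>'):
--                     return name
--             # failed candidate: rest of this line is dead
--             while j < n and traceback[j] != '\n':
--                 j += 1
--             i = j
--         else:
--             i += 1
--     return None
-- ===== Notes on version B (the rewrite author's own statement) =====
-- stated objective: alternative
-- what changed: Replaces A's split-into-lines loop with find/index-arithmetic/slice by a single cursor over the raw string: startswith at each position, the name is collected character by character up to the closing quote, and a failed candidate jumps the cursor to the next newline.
import Mathlib
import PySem

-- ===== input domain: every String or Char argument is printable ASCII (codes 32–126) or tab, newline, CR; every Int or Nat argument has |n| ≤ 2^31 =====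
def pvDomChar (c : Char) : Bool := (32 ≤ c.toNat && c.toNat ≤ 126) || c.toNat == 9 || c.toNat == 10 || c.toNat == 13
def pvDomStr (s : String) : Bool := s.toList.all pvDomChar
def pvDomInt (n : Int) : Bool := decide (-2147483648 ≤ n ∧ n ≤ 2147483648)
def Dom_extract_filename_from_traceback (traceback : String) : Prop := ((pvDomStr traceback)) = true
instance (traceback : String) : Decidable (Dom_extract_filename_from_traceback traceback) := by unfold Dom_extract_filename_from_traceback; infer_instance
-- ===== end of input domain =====

-- B replaces A's split-into-lines + find/index-arithmetic/slice loop by a single cursor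
-- over the raw character list (startswith at each position, name collected char by char,
-- failed candidate skips to the next newline); objective: alternative — return values proved equal.


-- ===== PORT A =====
-- the literal string constant 'File "'
def pvFileTag : List Char := ['F', 'i', 'l', 'e', ' ', '"']

-- A's for-loop with early return, line by line
def pvLoopA : List (List Char) → Option (List Char)
  | [] => none
  | line :: rest =>
    if PySem.Chars.isIn pvFileTag line then
      let start : Int := PySem.Chars.find line pvFileTag + 6
      let e : Int := PySem.Chars.findFrom line ['"'] start
      if start > 5 ∧ e > start then
        let filename := PySem.Chars.slice line (some start) (some e)
        if ¬ PySem.Chars.startswith filename ['<'] ∧ ¬ PySem.Chars.endswith filename ['>'] then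
          some filename
        else
          pvLoopA rest
      else
        pvLoopA rest
    else
      pvLoopA rest

def extract_filename_from_traceback (traceback : String) : Option String :=
  (pvLoopA (PySem.Chars.splitOn traceback.toList ['\n'])).map String.ofList

-- ===== PORT B =====
def pvTakeName : List Char → List Char × List Char
  | [] => ([], [])
  | c :: rest =>
    if c = '"' ∨ c = '\n' then ([], c :: rest)
    else
      let p := pvTakeName rest
      (c :: p.1, p.2)

def pvSkipToNL : List Char → List Char
  | [] => []
  | c :: rest => if c = '\n' then c :: rest else pvSkipToNL rest

theorem pvTakeName_snd_length_le (l : List Char) : (pvTakeName l).2.length ≤ l.length := by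
  induction l with
  | nil => simp [pvTakeName]
  | cons c rest ih =>
    simp only [pvTakeName]
    split_ifs <;> simp <;> omega

theorem pvSkipToNL_length_le (l : List Char) : (pvSkipToNL l).length ≤ l.length := by
  induction l with
  | nil => simp [pvSkipToNL]
  | cons c rest ih =>
    simp only [pvSkipToNL]
    split_ifs <;> simp <;> omega

def pvScan : List Char → Option (List Char)
  | [] => none
  | c :: rest =>
    if hpre : pvFileTag.isPrefixOf (c :: rest) then
      let p := pvTakeName ((c :: rest).drop 6)
      if p.2.head? = some '"' then
        if p.1 ≠ [] ∧ ¬ PySem.Chars.startswith p.1 ['<'] ∧ ¬ PySem.Chars.endswith p.1 ['>'] then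
          some p.1
        else
          pvScan (pvSkipToNL p.2)
      else
        pvScan (pvSkipToNL p.2)
    else
      pvScan rest
termination_by l => l.length
decreasing_by
  · have h6 : 6 ≤ (c :: rest).length := by
      have := (List.isPrefixOf_iff_prefix.mp hpre).length_le
      simpa [pvFileTag] using this
    have h1 := pvSkipToNL_length_le (pvTakeName ((c :: rest).drop 6)).2
    have h2 := pvTakeName_snd_length_le ((c :: rest).drop 6)
    simp only [List.length_drop] at h2
    simp only [List.length_cons] at *
    omega
  · have h6 : 6 ≤ (c :: rest).length := by
      have := (List.isPrefixOf_iff_prefix.mp hpre).length_le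
      simpa [pvFileTag] using this
    have h1 := pvSkipToNL_length_le (pvTakeName ((c :: rest).drop 6)).2
    have h2 := pvTakeName_snd_length_le ((c :: rest).drop 6)
    simp only [List.length_drop] at h2
    simp only [List.length_cons] at *
    omega
  · simp [Nat.lt_succ_self]

def extract_filename_from_traceback_alt (traceback : String) : Option String :=
  (pvScan traceback.toList).map String.ofList

-- ===== PRECONDITION & SPEC =====
def Spec_extract_filename_from_traceback (traceback : String) (out : Option String) : Prop := out = extract_filename_from_traceback_alt traceback
instance (traceback : String) (out : Option String) : Decidable (Spec_extract_filename_from_traceback traceback out) := by unfold Spec_extract_filename_from_traceback; infer_instance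

-- ===== CLAIM (what is proved, stated in full; the proofs are below) =====
def Claim_equal_extract_filename_from_traceback : Prop := ∀ (traceback : String), Dom_extract_filename_from_traceback traceback → Spec_extract_filename_from_traceback traceback (extract_filename_from_traceback traceback)

-- ===== LEMMAS AND PROOFS =====

-- A's per-line step, named
def pvStepA (line : List Char) : Option (List Char) :=
  if PySem.Chars.isIn pvFileTag line then
    let start : Int := PySem.Chars.find line pvFileTag + 6
    let e : Int := PySem.Chars.findFrom line ['"'] start
    if start > 5 ∧ e > start then
      let filename := PySem.Chars.slice line (some start) (some e)
      if ¬ PySem.Chars.startswith filename ['<'] ∧ ¬ PySem.Chars.endswith filename ['>'] then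
        some filename
      else none
    else none
  else none

-- B's per-line value (what pvScan decides while consuming one line)
def pvLineNaive : List Char → Option (List Char)
  | [] => none
  | c :: rest =>
    if pvFileTag.isPrefixOf (c :: rest) then
      let p := pvTakeName ((c :: rest).drop 6)
      if p.2.head? = some '"' then
        if p.1 ≠ [] ∧ ¬ PySem.Chars.startswith p.1 ['<'] ∧ ¬ PySem.Chars.endswith p.1 ['>'] then
          some p.1
        else none
      else none
    else pvLineNaive rest

-- reference line splitter (proved equal to PySem.Chars.splitOn · ['\n'])
def pvSplitNL : List Char → List (List Char)
  | [] => [[]]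
  | c :: rest => if c = '\n' then [] :: pvSplitNL rest else (pvSplitNL rest).modifyHead (c :: ·)

theorem pvLoopA_eq_findSome (ls : List (List Char)) : pvLoopA ls = ls.findSome? pvStepA := by
  induction ls with
  | nil => rfl
  | cons line rest ih =>
    rw [List.findSome?_cons]
    simp only [pvLoopA, pvStepA]
    split_ifs with h1 h2 h3 <;> simp [ih]

theorem pvSplitNL_ne_nil (l : List Char) : pvSplitNL l ≠ [] := by
  induction l with
  | nil => simp [pvSplitNL]
  | cons c rest ih =>
    simp only [pvSplitNL]
    split_ifs
    · simp
    · cases h : pvSplitNL rest with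
      | nil => exact absurd h ih
      | cons a t => simp [List.modifyHead]

theorem splitOn_go_eq : ∀ (fuel : Nat) (l cur acc_ : _), l.length < fuel →
    PySem.Chars.splitOn.go ['\n'] fuel l cur acc_ =
      acc_.reverse ++ (pvSplitNL l).modifyHead (cur.reverse ++ ·) := by
  intro fuel
  induction fuel with
  | zero => intro l cur acc_ h; omega
  | succ f ih =>
    intro l cur acc_ h
    cases l with
    | nil =>
      simp [PySem.Chars.splitOn.go, pvSplitNL, List.modifyHead]
    | cons c rest =>
      rw [PySem.Chars.splitOn.go]
      by_cases hc : c = '\n'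
      · subst hc
        rw [if_pos (by simp [List.isPrefixOf])]
        rw [ih _ _ _ (by simpa using h)]
        simp only [pvSplitNL, if_pos rfl]
        cases hs : pvSplitNL rest with
        | nil => exact absurd hs (pvSplitNL_ne_nil rest)
        | cons a t => simp [hs, List.modifyHead]
      · rw [if_neg (by simp [List.isPrefixOf]; exact fun hh => absurd hh.symm hc)]
        rw [ih _ _ _ (by simpa using h)]
        simp only [pvSplitNL, if_neg hc]
        cases hs : pvSplitNL rest with
        | nil => exact absurd hs (pvSplitNL_ne_nil rest)
        | cons a t => simp [hs, List.modifyHead]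

theorem splitOn_eq_pvSplitNL (l : List Char) : PySem.Chars.splitOn l ['\n'] = pvSplitNL l := by
  rw [PySem.Chars.splitOn, splitOn_go_eq (l.length + 1) l [] [] (by omega)]
  cases hs : pvSplitNL l with
  | nil => exact absurd hs (pvSplitNL_ne_nil l)
  | cons a t => simp [List.modifyHead]

theorem pvSplitNL_no_nl (l : List Char) (h : '\n' ∉ l) : pvSplitNL l = [l] := by
  induction l with
  | nil => rfl
  | cons c rest ih =>
    simp only [List.mem_cons, not_or] at h
    simp only [pvSplitNL, if_neg (Ne.symm h.1), ih h.2, List.modifyHead]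

theorem pvSplitNL_append (l t : List Char) (h : '\n' ∉ l) :
    pvSplitNL (l ++ '\n' :: t) = l :: pvSplitNL t := by
  induction l with
  | nil => simp [pvSplitNL]
  | cons c rest ih =>
    simp only [List.mem_cons, not_or] at h
    simp only [List.cons_append, pvSplitNL, if_neg (Ne.symm h.1), ih h.2, List.modifyHead]

theorem find_eq_zero_of_prefix (s sub : List Char) (h : sub <+: s) : PySem.Chars.find s sub = 0 := by
  have h0 : 0 ≤ PySem.Chars.find s sub :=
    (PySem.Chars.find_nonneg_iff _ _).mpr h.isInfix
  have spec := PySem.Chars.find_spec (s := s) (sub := sub) h0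
  by_contra hne
  have hpos : 0 < (PySem.Chars.find s sub).toNat := by omega
  exact spec.2 0 hpos (by simpa using h)

theorem find_cons_of_not_prefix (c : Char) (l sub : List Char) (hp : ¬ sub <+: (c :: l))
    (hi : sub <:+: l) : PySem.Chars.find (c :: l) sub = PySem.Chars.find l sub + 1 := by
  have h0 : 0 ≤ PySem.Chars.find l sub := (PySem.Chars.find_nonneg_iff _ _).mpr hi
  have spec := PySem.Chars.find_spec (s := l) (sub := sub) h0
  have h0' : 0 ≤ PySem.Chars.find (c :: l) sub :=
    (PySem.Chars.find_nonneg_iff _ _).mpr (List.infix_cons_iff.mpr (Or.inr hi))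
  have spec' := PySem.Chars.find_spec (s := c :: l) (sub := sub) h0'
  set i := (PySem.Chars.find l sub).toNat with hidef
  set j := (PySem.Chars.find (c :: l) sub).toNat with hjdef
  have hji : j ≤ i + 1 := by
    by_contra hgt
    exact spec'.2 (i + 1) (by omega) (by simpa using spec.1)
  have h1 := spec'.1
  have hij : i + 1 ≤ j := by
    by_contra hgt
    rcases Nat.eq_zero_or_pos j with hz | hpos
    · rw [hz] at h1
      exact hp (by simpa using h1)
    · rw [← Nat.succ_pred_eq_of_pos hpos, List.drop_succ_cons] at h1
      exact spec.2 (j - 1) (by omega) h1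
  omega

theorem pvTakeName_append_eq (d : List Char) : (pvTakeName d).1 ++ (pvTakeName d).2 = d := by
  induction d with
  | nil => rfl
  | cons c rest ih =>
    simp only [pvTakeName]
    split_ifs with h
    · rfl
    · simpa using ih

theorem pvTakeName_closed (d : List Char) (hn : '\n' ∉ d) (hq : '"' ∈ d) :
    PySem.Chars.find d ['"'] = ((pvTakeName d).1.length : Int) ∧
      ∃ r, (pvTakeName d).2 = '"' :: r := by
  induction d with
  | nil => simp at hq
  | cons c rest ih =>
    simp only [List.mem_cons, not_or] at hn
    by_cases hc : c = '"'
    · subst hc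
      refine ⟨find_eq_zero_of_prefix _ _ ⟨rest, rfl⟩, ?_⟩
      simp [pvTakeName]
    · have hq' : '"' ∈ rest := by
        rcases List.mem_cons.mp hq with h | h
        · exact absurd h.symm hc
        · exact h
      obtain ⟨hfind, r, hr⟩ := ih hn.2 hq'
      have hcond : ¬ (c = '"' ∨ c = '\n') := by
        push_neg
        exact ⟨hc, fun h => hn.1 h.symm⟩
      have hp : ¬ ['"'] <+: (c :: rest) := by
        intro h
        obtain ⟨t, ht⟩ := h
        simp only [List.singleton_append, List.cons.injEq] at ht
        exact hc ht.1.symm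
      have hshift := find_cons_of_not_prefix c rest ['"'] hp
        ((List.singleton_infix_iff _ _).mpr hq')
      refine ⟨?_, ?_⟩
      · rw [hshift, hfind]
        simp only [pvTakeName, if_neg hcond, List.length_cons]
        push_cast
        ring
      · simp only [pvTakeName, if_neg hcond]
        exact ⟨r, hr⟩

theorem pvTakeName_open (d : List Char) (hn : '\n' ∉ d) (hq : '"' ∉ d) :
    (pvTakeName d).2 = [] ∧ PySem.Chars.find d ['"'] = -1 := by
  constructor
  · induction d with
    | nil => rfl
    | cons c rest ih =>
      simp only [List.mem_cons, not_or] at hn hq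
      have hcond : ¬ (c = '"' ∨ c = '\n') := by
        push_neg
        exact ⟨fun h => hq.1 h.symm, fun h => hn.1 h.symm⟩
      simp only [pvTakeName, if_neg hcond]
      exact ih hn.2 hq.2
  · rw [PySem.Chars.find_eq_neg_one_iff, List.singleton_infix_iff]
    exact hq

theorem pvTakeName_take (d : List Char) :
    List.take (pvTakeName d).1.length d = (pvTakeName d).1 := by
  induction d with
  | nil => rfl
  | cons c rest ih =>
    simp only [pvTakeName]
    split_ifs
    · rfl
    · simpa using ih

theorem pvStepA_eq_pvLineNaive (line : List Char) (h : '\n' ∉ line) :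
    pvStepA line = pvLineNaive line := by
  induction line with
  | nil => decide
  | cons c l ih =>
    by_cases hpre : pvFileTag <+: (c :: l)
    case pos =>
      -- the tag sits at position 0
      have hlen : 6 ≤ (c :: l).length := by
        have := hpre.length_le
        simpa [pvFileTag] using this
      have hin : PySem.Chars.isIn pvFileTag (c :: l) = true :=
        (PySem.Chars.isIn_iff_infix _ _).mpr hpre.isInfix
      have hfind : PySem.Chars.find (c :: l) pvFileTag = 0 := find_eq_zero_of_prefix _ _ hpre
      set d : List Char := (c :: l).drop 6 with hd
      have hnd : '\n' ∉ d := fun hx => h (List.mem_of_mem_drop hx)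
      have hcast : (0 : Int) + 6 = ((6 : Nat) : Int) := by norm_num
      have hff := PySem.Chars.findFrom_natCast (c :: l) ['"'] 6 hlen
      rw [pvLineNaive, if_pos (List.isPrefixOf_iff_prefix.mpr hpre)]
      rw [pvStepA, if_pos hin]
      simp only [hfind, hcast, hff, ← hd]
      by_cases hq : '"' ∈ d
      case pos =>
        obtain ⟨hfq, r, hr⟩ := pvTakeName_closed d hnd hq
        rw [hfq]
        by_cases hne : (pvTakeName d).1 = []
        case pos =>
          rw [if_neg (by rw [hne]; norm_num)]
          simp [hr, hne]
        case neg =>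
          have hlpos : 0 < (pvTakeName d).1.length := List.length_pos_iff.mpr hne
          rw [if_neg (by omega : ¬ (((pvTakeName d).1.length : Int) = -1))]
          rw [if_pos ⟨by norm_num, by omega⟩]
          have hc2 : ((6 : Nat) : Int) + ((pvTakeName d).1.length : Int) =
              (((6 + (pvTakeName d).1.length : Nat)) : Int) := by push_cast; ring
          rw [hc2, PySem.Chars.slice_eq_listSlice, PySem.List.slice_natCast]
          have hslice : List.take (6 + (pvTakeName d).1.length - 6) (List.drop 6 (c :: l)) =
              (pvTakeName d).1 := by
            rw [← hd, Nat.add_sub_cancel_left]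
            exact pvTakeName_take d
          rw [hslice, hr]
          simp [hne]
      case neg =>
        obtain ⟨h2, hfq⟩ := pvTakeName_open d hnd hq
        rw [hfq]
        rw [if_neg (by norm_num)]
        simp [h2]
    case neg =>
      have hnl : '\n' ∉ l := fun hx => h (List.mem_cons_of_mem _ hx)
      rw [pvLineNaive, if_neg (fun hh => hpre (List.isPrefixOf_iff_prefix.mp hh)), ← ih hnl]
      by_cases hin : pvFileTag <:+: l
      case neg =>
        have hnin : ¬ pvFileTag <:+: (c :: l) := by
          rw [List.infix_cons_iff]
          rintro (hh | hh)
          · exact hpre hh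
          · exact hin hh
        rw [pvStepA, if_neg (by simpa using (PySem.Chars.isIn_eq_false_iff _ _).mpr hnin)]
        rw [pvStepA, if_neg (by simpa using (PySem.Chars.isIn_eq_false_iff _ _).mpr hin)]
      case pos =>
        have hi0 : 0 ≤ PySem.Chars.find l pvFileTag :=
          (PySem.Chars.find_nonneg_iff _ _).mpr hin
        have hspec := (PySem.Chars.find_spec (s := l) (sub := pvFileTag) hi0).1
        have h6 : pvFileTag.length = 6 := rfl
        have hlen6 : (PySem.Chars.find l pvFileTag).toNat + 6 ≤ l.length := by
          have := hspec.length_le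
          simp only [List.length_drop, h6] at this
          omega
        have hshift : PySem.Chars.find (c :: l) pvFileTag = PySem.Chars.find l pvFileTag + 1 :=
          find_cons_of_not_prefix c l _ hpre hin
        set i : Int := PySem.Chars.find l pvFileTag with hidef
        clear_value i
        rw [pvStepA, if_pos ((PySem.Chars.isIn_iff_infix _ _).mpr
          (List.infix_cons_iff.mpr (Or.inr hin)))]
        rw [pvStepA, if_pos ((PySem.Chars.isIn_iff_infix _ _).mpr hin)]
        simp only [hshift, ← hidef]
        have hc1 : i + 1 + 6 = (((i.toNat + 7 : Nat)) : Int) := by omega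
        have hc2 : i + 6 = (((i.toNat + 6 : Nat)) : Int) := by omega
        rw [hc1, hc2]
        rw [PySem.Chars.findFrom_natCast (c :: l) ['"'] (i.toNat + 7)
          (by simp only [List.length_cons]; omega)]
        rw [PySem.Chars.findFrom_natCast l ['"'] (i.toNat + 6) hlen6]
        have hdrop : (c :: l).drop (i.toNat + 7) = l.drop (i.toNat + 6) := by
          show (c :: l).drop ((i.toNat + 6) + 1) = l.drop (i.toNat + 6)
          exact List.drop_succ_cons
        rw [hdrop]
        have hjge := PySem.Chars.neg_one_le_find (l.drop (i.toNat + 6)) ['"']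
        by_cases hj : PySem.Chars.find (l.drop (i.toNat + 6)) ['"'] = -1
        case pos =>
          rw [if_pos hj, if_pos hj]
          rw [if_neg (by rintro ⟨h1, h2⟩; omega)]
          rw [if_neg (by rintro ⟨h1, h2⟩; omega)]
        case neg =>
          rw [if_neg hj, if_neg hj]
          by_cases hjpos : 0 < PySem.Chars.find (l.drop (i.toNat + 6)) ['"']
          case pos =>
            have hcc : ((i.toNat + 7 : Nat) : Int) > 5 ∧
                ((i.toNat + 7 : Nat) : Int) + PySem.Chars.find (List.drop (i.toNat + 6) l) ['"'] >
                  ((i.toNat + 7 : Nat) : Int) := ⟨by omega, by omega⟩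
            have hcl : ((i.toNat + 6 : Nat) : Int) > 5 ∧
                ((i.toNat + 6 : Nat) : Int) + PySem.Chars.find (List.drop (i.toNat + 6) l) ['"'] >
                  ((i.toNat + 6 : Nat) : Int) := ⟨by omega, by omega⟩
            rw [if_pos hcc, if_pos hcl]
            have hc3 : ((i.toNat + 7 : Nat) : Int) + PySem.Chars.find (l.drop (i.toNat + 6)) ['"'] =
                (((i.toNat + 7 + (PySem.Chars.find (l.drop (i.toNat + 6)) ['"']).toNat : Nat)) : Int) := by
              omega
            have hc4 : ((i.toNat + 6 : Nat) : Int) + PySem.Chars.find (l.drop (i.toNat + 6)) ['"'] =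
                (((i.toNat + 6 + (PySem.Chars.find (l.drop (i.toNat + 6)) ['"']).toNat : Nat)) : Int) := by
              omega
            have he1 : (i.toNat + 7 + (PySem.Chars.find (l.drop (i.toNat + 6)) ['"']).toNat)
                - (i.toNat + 7) = (PySem.Chars.find (l.drop (i.toNat + 6)) ['"']).toNat := by omega
            have he2 : (i.toNat + 6 + (PySem.Chars.find (l.drop (i.toNat + 6)) ['"']).toNat)
                - (i.toNat + 6) = (PySem.Chars.find (l.drop (i.toNat + 6)) ['"']).toNat := by omega
            rw [hc3, hc4]
            rw [PySem.Chars.slice_eq_listSlice, PySem.Chars.slice_eq_listSlice,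
              PySem.List.slice_natCast, PySem.List.slice_natCast, hdrop, he1, he2]
          case neg =>
            rw [if_neg (by rintro ⟨h1, h2⟩; omega)]
            rw [if_neg (by rintro ⟨h1, h2⟩; omega)]

theorem pvTakeName_append (d tail : List Char) :
    pvTakeName (d ++ tail) =
      if (pvTakeName d).2 = [] then ((pvTakeName d).1 ++ (pvTakeName tail).1, (pvTakeName tail).2)
      else ((pvTakeName d).1, (pvTakeName d).2 ++ tail) := by
  induction d with
  | nil => simp [pvTakeName]
  | cons c rest ih =>
    by_cases hc : c = '"' ∨ c = '\n'
    · simp [pvTakeName, hc]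
    · simp only [List.cons_append, pvTakeName, if_neg hc, ih]
      split_ifs <;> simp

theorem pvTakeName_snd_cases (d : List Char) (h : '\n' ∉ d) :
    (pvTakeName d).2 = [] ∨ ∃ r, (pvTakeName d).2 = '"' :: r := by
  induction d with
  | nil => exact Or.inl rfl
  | cons c rest ih =>
    simp only [List.mem_cons, not_or] at h
    by_cases hc : c = '"'
    · right
      exact ⟨rest, by simp [pvTakeName, hc]⟩
    · have hcond : ¬ (c = '"' ∨ c = '\n') := by
        rintro (hh | hh)
        · exact hc hh
        · exact h.1 hh.symm
      simp only [pvTakeName, if_neg hcond]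
      exact ih h.2

theorem pvSkipToNL_append (x t : List Char) (h : '\n' ∉ x) :
    pvSkipToNL (x ++ t) = pvSkipToNL t := by
  induction x with
  | nil => rfl
  | cons c rest ih =>
    simp only [List.mem_cons, not_or] at h
    simp only [List.cons_append, pvSkipToNL]
    rw [if_neg (show ¬ (c = '\n') from fun hh => h.1 hh.symm)]
    exact ih h.2

theorem pvScan_newline (t : List Char) : pvScan ('\n' :: t) = pvScan t := by
  rw [pvScan]
  rw [dif_neg (by simp [pvFileTag, List.isPrefixOf])]

theorem prefix_tag_append (line tail : List Char)
    (ht : tail = [] ∨ tail.head? = some '\n') :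
    pvFileTag <+: line ++ tail ↔ pvFileTag <+: line := by
  constructor
  · intro hp
    rcases ht with rfl | hh
    · simpa using hp
    · cases tail with
      | nil => simpa using hp
      | cons a t =>
        have ha : a = '\n' := by simpa using hh
        subst ha
        by_cases hl : 6 ≤ line.length
        · obtain ⟨rr, hr⟩ := hp
          have htake : (line ++ '\n' :: t).take 6 = line.take 6 :=
            List.take_append_of_le_length hl
          have htag : (pvFileTag ++ rr).take 6 = pvFileTag := by
            have : pvFileTag.length = 6 := rfl
            rw [← this, List.take_left]
          rw [hr] at htag
          rw [htake] at htag
          rw [← htag]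
          exact List.take_prefix _ _
        · exfalso
          obtain ⟨rr, hr⟩ := hp
          have h1 : (line ++ '\n' :: t)[line.length]? = some '\n' := by
            rw [List.getElem?_append_right (le_refl _)]
            simp
          have h2 : (pvFileTag ++ rr)[line.length]? = pvFileTag[line.length]? :=
            List.getElem?_append_left (by simp [pvFileTag]; omega)
          rw [hr, h1] at h2
          have : '\n' ∈ pvFileTag := List.mem_of_getElem? h2.symm
          exact absurd this (by decide)
  · intro hp
    exact hp.trans (line.prefix_append tail)

theorem pvScan_line (line tail : List Char) (h : '\n' ∉ line)
    (ht : tail = [] ∨ tail.head? = some '\n') :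
    pvScan (line ++ tail) =
      match pvLineNaive line with
      | some v => some v
      | none => pvScan tail.tail := by
  induction line with
  | nil =>
    rcases ht with rfl | hh
    · rfl
    · cases tail with
      | nil => rfl
      | cons a t =>
        have ha : a = '\n' := by simpa using hh
        subst ha
        simpa [pvLineNaive] using pvScan_newline t
  | cons c l ih =>
    have hnl : '\n' ∉ l := fun hx => h (List.mem_cons_of_mem _ hx)
    by_cases hpre : pvFileTag <+: (c :: l)
    case pos =>
      have hpre' : pvFileTag.isPrefixOf ((c :: l) ++ tail) :=
        List.isPrefixOf_iff_prefix.mpr ((prefix_tag_append (c :: l) tail ht).mpr hpre)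
      have hlen : 6 ≤ (c :: l).length := by
        have := hpre.length_le
        simpa [pvFileTag] using this
      have hdrop : ((c :: l) ++ tail).drop 6 = (c :: l).drop 6 ++ tail :=
        List.drop_append_of_le_length hlen
      set d : List Char := (c :: l).drop 6 with hd
      have hnd : '\n' ∉ d := fun hx => h (List.mem_of_mem_drop hx)
      have hsub2 : ∀ x ∈ (pvTakeName d).2, x ∈ d := by
        intro x hx
        rw [← pvTakeName_append_eq d]
        exact List.mem_append_right _ hx
      rw [List.cons_append, pvScan, dif_pos (by simpa using hpre')]
      rw [show (c :: (l ++ tail)).drop 6 = d ++ tail from by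
        simpa using hdrop]
      rw [pvTakeName_append]
      rw [pvLineNaive, if_pos (List.isPrefixOf_iff_prefix.mpr hpre), ← hd]
      rcases pvTakeName_snd_cases d hnd with hnil | ⟨r, hr⟩
      · rw [if_pos hnil]
        dsimp only
        rw [hnil]
        rcases ht with rfl | hh
        · rw [show pvTakeName ([] : List Char) = ([], []) from rfl]
          dsimp only
          rw [if_neg (by simp)]
          simp [pvSkipToNL, pvScan]
        · cases tail with
          | nil =>
            rw [show pvTakeName ([] : List Char) = ([], []) from rfl]
            dsimp only
            rw [if_neg (by simp)]
            simp [pvSkipToNL, pvScan]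
          | cons a t =>
            have ha : a = '\n' := by simpa using hh
            subst ha
            rw [show pvTakeName ('\n' :: t) = ([], '\n' :: t) from by simp [pvTakeName]]
            dsimp only
            rw [if_neg (by simp)]
            simp only [List.tail_cons]
            rw [show pvSkipToNL ('\n' :: t) = '\n' :: t from by simp [pvSkipToNL]]
            exact pvScan_newline t
      · have hne : (pvTakeName d).2 ≠ [] := by simp [hr]
        have hnr : '\n' ∉ '"' :: r := fun hx => hnd (hsub2 _ (hr ▸ hx))
        rw [if_neg hne, hr]
        dsimp only
        rw [hr]
        by_cases hf : (pvTakeName d).1 ≠ [] ∧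
            ¬ PySem.Chars.startswith (pvTakeName d).1 ['<'] = true ∧
            ¬ PySem.Chars.endswith (pvTakeName d).1 ['>'] = true
        · rw [if_pos hf, if_pos hf]
          rfl
        · rw [if_neg hf, if_neg hf, ite_self, ite_self]
          show pvScan (pvSkipToNL (('"' :: r) ++ tail)) = pvScan tail.tail
          rw [pvSkipToNL_append _ _ hnr]
          rcases ht with rfl | hh
          · simp [pvSkipToNL, pvScan]
          · cases tail with
            | nil => simp [pvSkipToNL, pvScan]
            | cons a t =>
              have ha : a = '\n' := by simpa using hh
              subst ha
              simp only [List.tail_cons]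
              rw [show pvSkipToNL ('\n' :: t) = '\n' :: t from by simp [pvSkipToNL]]
              exact pvScan_newline t
    case neg =>
      have hnpre : ¬ pvFileTag.isPrefixOf ((c :: l) ++ tail) := fun hh =>
        hpre ((prefix_tag_append (c :: l) tail ht).mp (List.isPrefixOf_iff_prefix.mp hh))
      rw [List.cons_append, pvScan, dif_neg (by simpa using hnpre)]
      rw [pvLineNaive, if_neg (fun hh => hpre (List.isPrefixOf_iff_prefix.mp hh))]
      exact ih hnl

theorem pvScan_nil : pvScan [] = none := by rw [pvScan]

theorem dropWhile_head?_false (p : Char → Bool) (l : List Char) (a : Char)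
    (h : (l.dropWhile p).head? = some a) : p a = false := by
  induction l with
  | nil => simp at h
  | cons x xs ih =>
    rw [List.dropWhile_cons] at h
    by_cases hp : p x = true
    · rw [if_pos hp] at h
      exact ih h
    · rw [if_neg hp] at h
      simp only [List.head?_cons, Option.some.injEq] at h
      rw [← h]
      simpa using hp

theorem pvScan_eq_findSome_aux : ∀ (n : Nat) (cs : List Char), cs.length ≤ n →
    pvScan cs = (pvSplitNL cs).findSome? pvLineNaive := by
  intro n
  induction n with
  | zero =>
    intro cs hle
    have hcs : cs = [] := List.eq_nil_of_length_eq_zero (by omega)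
    subst hcs
    rw [pvScan_nil]
    rfl
  | succ n ihn =>
    intro cs hle
    have hsplit : cs.takeWhile (fun x => x != '\n') ++ cs.dropWhile (fun x => x != '\n') = cs :=
      List.takeWhile_append_dropWhile
    have hL : '\n' ∉ cs.takeWhile (fun x => x != '\n') := by
      intro hx
      have := List.mem_takeWhile_imp hx
      simp at this
    cases hd : cs.dropWhile (fun x => x != '\n') with
    | nil =>
      generalize hg : cs.takeWhile (fun x => x != '\n') = L at hL hsplit
      rw [hd, List.append_nil] at hsplit
      subst hsplit
      rw [pvSplitNL_no_nl _ hL]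
      have hline := pvScan_line L [] hL (Or.inl rfl)
      rw [List.append_nil] at hline
      rw [hline]
      cases hstep : pvLineNaive L with
      | none => simp [List.findSome?_cons, hstep, pvScan_nil]
      | some v => simp [List.findSome?_cons, hstep]
    | cons a t =>
      have ha : a = '\n' := by
        have h1 : (cs.dropWhile (fun x => x != '\n')).head? = some a := by rw [hd]; rfl
        have := dropWhile_head?_false _ _ _ h1
        simpa using this
      subst ha
      generalize hg : cs.takeWhile (fun x => x != '\n') = L at hL hsplit
      rw [hd] at hsplit
      subst hsplit
      have hlen : t.length ≤ n := by
        simp only [List.length_append, List.length_cons] at hle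
        omega
      rw [pvSplitNL_append _ _ hL, pvScan_line _ _ hL (Or.inr rfl), List.findSome?_cons]
      cases hstep : pvLineNaive L with
      | none => simp [hstep, ihn t hlen]
      | some v => simp [hstep]

theorem pvSplitNL_mem_no_nl (cs : List Char) : ∀ l ∈ pvSplitNL cs, '\n' ∉ l := by
  induction cs with
  | nil =>
    intro l hl
    simp only [pvSplitNL, List.mem_singleton] at hl
    subst hl
    simp
  | cons c rest ih =>
    intro l hl
    by_cases hc : c = '\n'
    · rw [pvSplitNL, if_pos hc] at hl
      rcases List.mem_cons.mp hl with rfl | hl'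
      · simp
      · exact ih l hl'
    · rw [pvSplitNL, if_neg hc] at hl
      cases hs : pvSplitNL rest with
      | nil => exact absurd hs (pvSplitNL_ne_nil rest)
      | cons a t =>
        rw [hs, List.modifyHead] at hl
        rcases List.mem_cons.mp hl with rfl | hl'
        · intro hx
          rcases List.mem_cons.mp hx with hx' | hx'
          · exact hc hx'.symm
          · exact ih a (hs ▸ List.mem_cons_self) hx'
        · exact ih l (hs ▸ List.mem_cons_of_mem _ hl')

theorem findSome?_line_eq (ls : List (List Char)) (h : ∀ l ∈ ls, '\n' ∉ l) :
    ls.findSome? pvLineNaive = ls.findSome? pvStepA := by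
  induction ls with
  | nil => rfl
  | cons a t ih =>
    rw [List.findSome?_cons, List.findSome?_cons,
      ← pvStepA_eq_pvLineNaive a (h a List.mem_cons_self)]
    cases pvStepA a with
    | some v => rfl
    | none => exact ih (fun l hl => h l (List.mem_cons_of_mem _ hl))

-- ===== VERDICT (by name: the statement is the Claim_ definition above) =====
theorem extract_filename_from_traceback_spec : Claim_equal_extract_filename_from_traceback := by
  intro tb _
  unfold Spec_extract_filename_from_traceback extract_filename_from_traceback
    extract_filename_from_traceback_alt
  rw [pvLoopA_eq_findSome, splitOn_eq_pvSplitNL,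
    pvScan_eq_findSome_aux tb.toList.length tb.toList le_rfl,
    findSome?_line_eq _ (pvSplitNL_mem_no_nl tb.toList)]
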